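-- pv_equiv track=rewrite | github.com/saif-qureshi/airbyte-source-excel | source_excel_sheets/utils.py | deduplicate_headers
-- ===== SOURCE A (Python) =====
-- from typing import Any, Dict, List, Optional, Tuple
--
-- def excel_column_label(col_index: int) -> str:
--     """Convert a 0-based column index to an Excel-style column letter (A, B, ..., Z, AA, AB, ...)."""
--     label = ""
--     col_index += 1  # Convert to 1-based index
--     while col_index > 0:
--         col_index -= 1
--         label = chr(65 + (col_index % 26)) + label
--         col_index //= 26
--     return label
--
-- def deduplicate_headers(headers: List[str]) -> List[str]:
--     """Deduplicate headers by appending cell position to duplicates."""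
--     seen = {}
--     result = []
--
--     for idx, header in enumerate(headers):
--         if header in seen:
--             seen[header] += 1
--             col_letter = excel_column_label(idx)
--             new_header = f"{header}_{col_letter}1"
--             result.append(new_header)
--         else:
--             seen[header] = 1
--             result.append(header)
--
--     return result
-- ===== SOURCE B (Python) =====
-- from typing import List
--
-- def excel_column_label(col_index: int) -> str:
--     """Convert a 0-based column index to an Excel-style column letter (A, B, ..., Z, AA, AB, ...)."""
--     label = ""
--     col_index += 1  # Convert to 1-based index
--     while col_index > 0:
--         col_index -= 1
--         label = chr(65 + (col_index % 26)) + label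
--         col_index //= 26
--     return label
--
-- def deduplicate_headers(headers: List[str]) -> List[str]:
--     """Deduplicate headers via sort-then-scan: stably sort the indices by header,
--     so equal headers become adjacent with their original order preserved; every
--     index that follows an equal header in sorted order is a duplicate."""
--     order = sorted(range(len(headers)), key=lambda i: headers[i])
--     dups = {b for a, b in zip(order, order[1:]) if headers[a] == headers[b]}
--     return [f"{h}_{excel_column_label(i)}1" if i in dups else h
--             for i, h in enumerate(headers)]
-- ===== Notes on version B (the rewrite author's own statement) =====
-- stated objective: alternative
-- what changed: Replaces A's streaming pass with a maintained seen-counter dict by a sort-then-scan algorithm: stably sort the indices by header so equal headers become adjacent in original order, collect every index that follows an equal header in sorted order into a dups set, then emit in one comprehension.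
import Mathlib
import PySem

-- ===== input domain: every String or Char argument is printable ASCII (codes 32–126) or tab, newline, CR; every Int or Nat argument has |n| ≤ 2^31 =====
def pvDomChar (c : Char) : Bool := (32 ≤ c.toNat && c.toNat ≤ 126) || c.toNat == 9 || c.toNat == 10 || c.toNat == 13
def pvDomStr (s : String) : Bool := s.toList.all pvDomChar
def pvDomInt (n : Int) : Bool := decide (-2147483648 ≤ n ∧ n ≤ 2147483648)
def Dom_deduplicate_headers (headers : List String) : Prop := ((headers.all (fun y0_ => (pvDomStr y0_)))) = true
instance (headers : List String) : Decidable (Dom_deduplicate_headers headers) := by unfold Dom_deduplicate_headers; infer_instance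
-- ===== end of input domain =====

-- B replaces A's streaming seen-dict with a sort-then-scan algorithm: stably sort
-- the indices by header, mark every index adjacent after an equal header, then emit
-- (alternative decomposition; not faster).


-- ===== PORT A =====
-- while col_index > 0: col_index -= 1; label = chr(65+(col_index%26)) + label; col_index //= 26
-- (exact: the Python loop only runs for positive col_index, where Nat arithmetic agrees with //, %)
def excel_label_loop (c : Nat) (label : List Char) : List Char :=
  if c = 0 then label
  else excel_label_loop ((c - 1) / 26) (Char.ofNat (65 + (c - 1) % 26) :: label)
decreasing_by exact Nat.lt_of_le_of_lt (Nat.div_le_self _ _) (by omega)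

-- excel_column_label(i): for i ≤ -1 the Python loop never runs and returns "" — (i+1).toNat = 0 matches
def excel_column_label (i : Int) : String := String.ofList (excel_label_loop (i + 1).toNat [])

-- f"{header}_{col_letter}1"
def dupName (h : String) (i : Int) : String := h ++ "_" ++ excel_column_label i ++ "1"

def dedupA_go (seen : PySem.Dict String Int) (idx : Int) : List String → List String
  | [] => []
  | h :: t =>
    match seen.get? h with
    | some n => dupName h idx :: dedupA_go (seen.insert h (n + 1)) (idx + 1) t
    | none => h :: dedupA_go (seen.insert h 1) (idx + 1) t

def deduplicate_headers (headers : List String) : List String :=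
  dedupA_go PySem.Dict.empty 0 headers

-- ===== PORT B =====
-- order = sorted(range(len(headers)), key=lambda i: headers[i])
-- dups = {b for a, b in zip(order, order[1:]) if headers[a] == headers[b]}
-- return [f"{h}_{excel_column_label(i)}1" if i in dups else h for i, h in enumerate(headers)]
-- (headers[i] inside the key/comparisons is ported as pyGetD; every i drawn from range(len) is in range)
def deduplicate_headers_alt (headers : List String) : List String :=
  let key : Int → String := fun i => PySem.List.pyGetD headers i ""
  let order := PySem.List.sorted (PySem.List.pyRange 0 (headers.length : Int) 1) key
  let dups : PySem.Set Int := PySem.Set.ofList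
    (((order.zip (PySem.List.slice order (some 1) none)).filter
        (fun p => key p.1 == key p.2)).map (fun p => p.2))
  (PySem.List.enumerate headers).map (fun p => if p.1 ∈ dups then dupName p.2 p.1 else p.2)

-- ===== PRECONDITION & SPEC =====
def Spec_deduplicate_headers (headers : List String) (out : List String) : Prop := out = deduplicate_headers_alt headers
instance (headers : List String) (out : List String) : Decidable (Spec_deduplicate_headers headers out) := by unfold Spec_deduplicate_headers; infer_instance

-- ===== CLAIM (what is proved, stated in full; the proofs are below) =====
def Claim_equal_deduplicate_headers : Prop := ∀ (headers : List String), Dom_deduplicate_headers headers → Spec_deduplicate_headers headers (deduplicate_headers headers)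

-- ===== LEMMAS AND PROOFS =====

-- common reference point: emit t having already seen the prefix `pre` of the whole list
def specGo (pre : List String) : List String → List String
  | [] => []
  | h :: t => (if h ∈ pre then dupName h (pre.length : Int) else h) :: specGo (pre ++ [h]) t

lemma dedupA_go_eq_specGo (t : List String) :
    ∀ (pre : List String) (seen : PySem.Dict String Int),
      (∀ h, (seen.get? h).isSome = decide (h ∈ pre)) →
      dedupA_go seen (pre.length : Int) t = specGo pre t := by
  induction t with
  | nil => intro pre seen _; rfl
  | cons h t ih =>
    intro pre seen hinv
    have hh := hinv h
    by_cases hmem : h ∈ pre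
    · simp [hmem] at hh
      obtain ⟨n, hn⟩ := Option.isSome_iff_exists.mp hh
      have : dedupA_go seen (pre.length : Int) (h :: t)
          = dupName h (pre.length : Int) :: dedupA_go (seen.insert h (n + 1)) ((pre.length : Int) + 1) t := by
        simp [dedupA_go, hn]
      rw [this]
      have hrec : dedupA_go (seen.insert h (n + 1)) (((pre ++ [h]).length : Int)) t
          = specGo (pre ++ [h]) t := by
        apply ih
        intro x
        rw [PySem.Dict.get?_insert]
        by_cases hx : x = h <;> simp [hx, hinv x, hmem]
      simp only [List.length_append, List.length_singleton] at hrec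
      simp [specGo, hmem]
      rw [← hrec]; norm_num
    · simp [hmem] at hh
      have : dedupA_go seen (pre.length : Int) (h :: t)
          = h :: dedupA_go (seen.insert h 1) ((pre.length : Int) + 1) t := by
        simp [dedupA_go, hh]
      rw [this]
      have hrec : dedupA_go (seen.insert h 1) (((pre ++ [h]).length : Int)) t
          = specGo (pre ++ [h]) t := by
        apply ih
        intro x
        rw [PySem.Dict.get?_insert]
        by_cases hx : x = h <;> simp [hx, hinv x, hmem]
      simp only [List.length_append, List.length_singleton] at hrec
      simp [specGo, hmem]
      rw [← hrec]; norm_num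

-- the prefix-membership emitter, intermediate between the two ports
def prefixMap (headers : List String) : List String :=
  (PySem.List.enumerate headers).map (fun p =>
    if p.2 ∈ PySem.List.slice headers none (some p.1) then dupName p.2 p.1 else p.2)

lemma prefixMapGo_eq_specGo (t : List String) :
    ∀ (pre : List String),
      (PySem.List.enumerate t (pre.length : Int)).map (fun p =>
          if p.2 ∈ PySem.List.slice (pre ++ t) none (some p.1) then dupName p.2 p.1 else p.2)
        = specGo pre t := by
  induction t with
  | nil => intro pre; rfl
  | cons h t ih =>
    intro pre
    rw [PySem.List.enumerate_cons, List.map_cons]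
    have hsl : PySem.List.slice (pre ++ h :: t) none (some (pre.length : Int)) = pre := by
      rw [PySem.List.slice_to _ (Int.natCast_nonneg _)]
      simp
    have htail : (PySem.List.enumerate t ((pre.length : Int) + 1)).map (fun p =>
          if p.2 ∈ PySem.List.slice (pre ++ h :: t) none (some p.1) then dupName p.2 p.1 else p.2)
        = specGo (pre ++ [h]) t := by
      have := ih (pre ++ [h])
      simp only [List.length_append, List.length_singleton, Nat.cast_add, Nat.cast_one,
        List.append_assoc, List.singleton_append] at this
      exact this
    rw [specGo]
    simp only [hsl, htail]

-- the "stably sorted" strict order on indices: by key, ties by index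
def lexlt (key : Int → String) (a b : Int) : Prop := key a < key b ∨ (key a = key b ∧ a < b)

lemma insertBy_pairwise_lexlt (key : Int → String) (x : Int) (acc : List Int)
    (hp : acc.Pairwise (lexlt key)) (hlt : ∀ y ∈ acc, y < x) :
    (PySem.List.insertBy (fun a b => decide (key a < key b)) x acc).Pairwise (lexlt key) := by
  induction acc with
  | nil => simp [PySem.List.insertBy, lexlt]
  | cons y ys ih =>
    rw [List.pairwise_cons] at hp
    obtain ⟨hy, hys⟩ := hp
    by_cases hk : key x < key y
    · rw [show PySem.List.insertBy (fun a b => decide (key a < key b)) x (y :: ys)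
          = x :: y :: ys by simp [PySem.List.insertBy, hk]]
      refine List.pairwise_cons.mpr ⟨?_, List.pairwise_cons.mpr ⟨hy, hys⟩⟩
      intro z hz
      rcases List.mem_cons.mp hz with hz | hz
      · subst hz; exact Or.inl hk
      · rcases hy z hz with h | ⟨h, _⟩
        · exact Or.inl (lt_trans hk h)
        · exact Or.inl (h ▸ hk)
    · rw [show PySem.List.insertBy (fun a b => decide (key a < key b)) x (y :: ys)
          = y :: PySem.List.insertBy (fun a b => decide (key a < key b)) x ys by
            simp [PySem.List.insertBy, hk]]
      refine List.pairwise_cons.mpr ⟨?_, ih hys (fun z hz => hlt z (List.mem_cons_of_mem _ hz))⟩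
      intro z hz
      rcases (PySem.List.insertBy_mem_iff _ _ _ _).mp hz with hz | hz
      · subst hz
        rcases lt_or_eq_of_le (le_of_not_gt hk) with h | h
        · exact Or.inl h
        · exact Or.inr ⟨h, hlt y (List.mem_cons_self)⟩
      · exact hy z hz

lemma foldl_insertBy_pairwise_lexlt (key : Int → String) :
    ∀ (xs acc : List Int), xs.Pairwise (· < ·) → acc.Pairwise (lexlt key) →
      (∀ y ∈ acc, ∀ x ∈ xs, y < x) →
      (xs.foldl (fun acc x => PySem.List.insertBy (fun a b => decide (key a < key b)) x acc) acc).Pairwise (lexlt key) := by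
  intro xs
  induction xs with
  | nil => intro acc _ hacc _; exact hacc
  | cons x xs ih =>
    intro acc hxs hacc hsep
    rw [List.pairwise_cons] at hxs
    simp only [List.foldl_cons]
    apply ih _ hxs.2
    · exact insertBy_pairwise_lexlt key x acc hacc (fun y hy => hsep y hy x List.mem_cons_self)
    · intro y hy x' hx'
      rcases (PySem.List.insertBy_mem_iff _ _ _ _).mp hy with hy | hy
      · exact hy ▸ hxs.1 x' hx'
      · exact hsep y hy x' (List.mem_cons_of_mem _ hx')

lemma sorted_range_pairwise_lexlt (key : Int → String) (n : Int) :
    (PySem.List.sorted (PySem.List.pyRange 0 n 1) key).Pairwise (lexlt key) := by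
  rw [PySem.List.sorted_eq_foldl_insertBy]
  exact foldl_insertBy_pairwise_lexlt key _ []
    (PySem.List.pairwise_lt_pyRange_one 0 n) List.Pairwise.nil (by simp)

lemma zip_tail_mem_iff (l : List Int) (a b : Int) :
    (a, b) ∈ l.zip l.tail ↔ ∃ p, ∃ h : p + 1 < l.length, l[p] = a ∧ l[p+1] = b := by
  rw [List.mem_iff_getElem]
  constructor
  · rintro ⟨i, hi, hget⟩
    have hlen : (l.zip l.tail).length = l.length - 1 := by
      simp [List.length_zip, List.length_tail]
    refine ⟨i, by omega, ?_, ?_⟩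
    · have := hget
      rw [List.getElem_zip] at this
      exact congrArg Prod.fst this
    · have := hget
      rw [List.getElem_zip] at this
      have h2 := congrArg Prod.snd this
      simpa [List.getElem_tail] using h2
  · rintro ⟨p, hp, ha, hb⟩
    have hlen : (l.zip l.tail).length = l.length - 1 := by
      simp [List.length_zip, List.length_tail]
    refine ⟨p, by omega, ?_⟩
    rw [List.getElem_zip]
    simp [List.getElem_tail, ha, hb]

lemma dups_mem_iff (headers : List String) (k : Nat) (hk : k < headers.length) :
    ((k : Int) ∈ PySem.Set.ofList
        ((((PySem.List.sorted (PySem.List.pyRange 0 (headers.length : Int) 1)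
              (fun i => PySem.List.pyGetD headers i "")).zip
            (PySem.List.slice (PySem.List.sorted (PySem.List.pyRange 0 (headers.length : Int) 1)
              (fun i => PySem.List.pyGetD headers i "")) (some 1) none)).filter
          (fun p => PySem.List.pyGetD headers p.1 "" == PySem.List.pyGetD headers p.2 "")).map
          (fun p => p.2)))
      ↔ headers[k] ∈ headers.take k := by
  set key : Int → String := fun i => PySem.List.pyGetD headers i "" with hkey
  set ord := PySem.List.sorted (PySem.List.pyRange 0 (headers.length : Int) 1) key with hord
  have hperm : ord.Perm (PySem.List.pyRange 0 (headers.length : Int) 1) :=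
    PySem.List.sorted_perm _ _ _
  have hmemord : ∀ i : Int, i ∈ ord ↔ 0 ≤ i ∧ i < (headers.length : Int) := by
    intro i
    rw [hperm.mem_iff, PySem.List.mem_pyRange_one]
  have hpair : ord.Pairwise (lexlt key) := sorted_range_pairwise_lexlt key _
  have hkeyval : ∀ (q : Nat) (hq : q < headers.length), key (q : Int) = headers[q]'hq := by
    intro q hq
    simp only [hkey]
    rw [PySem.List.pyGetD_eq_getElem headers "" (by positivity) (by exact_mod_cast hq)]
    simp
  rw [PySem.Set.mem_ofList, PySem.List.slice_from_one]
  rw [List.mem_map]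
  constructor
  · rintro ⟨⟨a, b⟩, hpmem, hb⟩
    rw [List.mem_filter] at hpmem
    obtain ⟨hzip, heq⟩ := hpmem
    simp only at hb; subst hb
    have heq' : key a = key (k : Int) := by
      simpa [hkey] using (beq_iff_eq.mp heq)
    obtain ⟨p, hp, ha, hb'⟩ := (zip_tail_mem_iff ord a _).mp hzip
    -- lexlt a ↑k from pairwise at positions p < p+1
    have hlex : lexlt key a (k : Int) := by
      have := List.pairwise_iff_getElem.mp hpair p (p+1) (by omega) hp (by omega)
      rw [ha, hb'] at this; exact this
    have halt : a < (k : Int) := by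
      rcases hlex with h | ⟨_, h⟩
      · exact absurd heq' (ne_of_lt h)
      · exact h
    have hamem : a ∈ ord := by rw [List.mem_iff_getElem]; exact ⟨p, by omega, ha⟩
    have ⟨ha0, _⟩ := (hmemord a).mp hamem
    set q := a.toNat with hq
    have haq : a = (q : Int) := by omega
    have hqk : q < k := by omega
    rw [List.mem_take_iff_getElem]
    refine ⟨q, by omega, ?_⟩
    have := heq'
    rw [haq, hkeyval q (by omega), hkeyval k hk] at this
    exact this
  · intro hmem
    rw [List.mem_take_iff_getElem] at hmem
    obtain ⟨q, hq, hqval⟩ := hmem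
    have hqk : q < k := by omega
    have hkeyeq : key (q : Int) = key (k : Int) := by
      rw [hkeyval q (by omega), hkeyval k hk]; exact hqval
    -- position of ↑k in ord
    have hkmem : (k : Int) ∈ ord := (hmemord _).mpr ⟨by positivity, by exact_mod_cast hk⟩
    obtain ⟨p, hp, hpval⟩ := List.mem_iff_getElem.mp hkmem
    have hqmem : (q : Int) ∈ ord := (hmemord _).mpr ⟨by positivity, by exact_mod_cast (by omega : q < headers.length)⟩
    obtain ⟨r, hr, hrval⟩ := List.mem_iff_getElem.mp hqmem
    have hne : r ≠ p := by
      intro h; subst h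
      have : (q:Int) = (k:Int) := by rw [← hrval, hpval]
      omega
    have hrp : r < p := by
      by_contra h
      push Not at h
      have hlt : p < r := lt_of_le_of_ne h (Ne.symm hne)
      have := List.pairwise_iff_getElem.mp hpair p r hp hr hlt
      rw [hpval, hrval] at this
      rcases this with h' | ⟨_, h'⟩
      · exact absurd hkeyeq (ne_of_lt h').symm
      · omega
    have hp0 : 0 < p := by omega
    -- predecessor
    set a := ord[p-1]'(by omega) with hadef
    have hlex_a : lexlt key a (k : Int) := by
      have := List.pairwise_iff_getElem.mp hpair (p-1) p (by omega) hp (by omega)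
      rw [hpval] at this; exact this
    have hle2 : key a ≤ key (k : Int) := by
      rcases hlex_a with h | ⟨h, _⟩
      · exact le_of_lt h
      · exact le_of_eq h
    have hkey_a : key a = key (k : Int) := by
      rcases Nat.lt_or_ge r (p-1) with hcase | hcase
      · -- q strictly before predecessor: key q ≤ key a ≤ key k, all equal
        have h1 := List.pairwise_iff_getElem.mp hpair r (p-1) hr (by omega) hcase
        rw [hrval] at h1
        have hle1 : key (q : Int) ≤ key a := by
          rcases h1 with h | ⟨h, _⟩
          · exact le_of_lt h
          · exact le_of_eq h
        exact le_antisymm hle2 (hkeyeq ▸ hle1)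
      · have hrp1 : p - 1 = r := by omega
        have ha' : a = (q : Int) := by rw [hadef]; rw [show ord[p-1]'(by omega) = ord[r] from by congr 1]; exact hrval
        rw [ha']; exact hkeyeq
    -- assemble membership
    refine ⟨(a, (k : Int)), ?_, rfl⟩
    rw [List.mem_filter]
    constructor
    · rw [zip_tail_mem_iff]
      exact ⟨p - 1, by omega, rfl, by simpa [Nat.sub_add_cancel hp0] using hpval⟩
    · simpa [hkey] using (beq_iff_eq.mpr hkey_a)

-- ===== VERDICT (by name: the statement is the Claim_ definition above) =====
theorem deduplicate_headers_spec : Claim_equal_deduplicate_headers := by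
  intro headers _
  unfold Spec_deduplicate_headers
  have hA : deduplicate_headers headers = specGo [] headers := by
    have h := dedupA_go_eq_specGo headers [] PySem.Dict.empty (by
      intro h; simp [PySem.Dict.get?_empty])
    simpa [deduplicate_headers] using h
  have hPre : prefixMap headers = specGo [] headers := by
    have h := prefixMapGo_eq_specGo headers []
    simpa [prefixMap] using h
  have hB : deduplicate_headers_alt headers = prefixMap headers := by
    unfold deduplicate_headers_alt prefixMap
    apply List.map_congr_left
    intro p hp
    obtain ⟨k, hk, hpk⟩ := (PySem.List.mem_enumerate_iff _ _ _).mp hp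
    subst hpk
    simp only [zero_add]
    have hiff := dups_mem_iff headers k hk
    have hslice : PySem.List.slice headers none (some (k : Int)) = headers.take k :=
      PySem.List.slice_to_natCast headers k
    rw [hslice]
    exact if_congr hiff rfl rfl
  rw [hA, hB, hPre]
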